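-- pv_equiv track=rewrite | github.com/MatthewWest/AdventOfCode2019 | day17.py | moves_covered_if_used
-- ===== SOURCE A (Python) =====
-- def moves_covered_if_used(path, seq, unusable=set()):
--   n = 0
--   for i in range(len(path)):
--     matches = True
--     for a, b in zip(path[i:], seq):
--       if a != b or a in unusable:
--         matches = False
--         break
--     if matches:
--       n += len(seq)
--   return n
-- ===== SOURCE B (Python) =====
-- def moves_covered_if_used(path, seq, unusable=set()):
--     """Single left-to-right pass: simulate all pending partial matches at once
--     (list of match progresses), counting full matches as they complete and
--     truncated end-of-path matches from the surviving progresses."""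
--     m = len(seq)
--     if m == 0:
--         return 0
--     total = 0
--     active = []
--     for x in path:
--         good = x not in unusable
--         nxt = []
--         for j in active + [0]:
--             if good and x == seq[j]:
--                 if j + 1 == m:
--                     total += 1
--                 else:
--                     nxt.append(j + 1)
--         active = nxt
--     return m * (total + len(active))
-- ===== Notes on version B (the rewrite author's own statement) =====
-- stated objective: faster
-- what changed: Replaces A's per-start window rescan (for every index i, re-scan zip(path[i:], seq)) by a single left-to-right pass over path that carries the list of progresses of all still-alive partial matches, counting completed matches on the fly and truncated end-of-path matches from the surviving progresses.
import Mathlib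
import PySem

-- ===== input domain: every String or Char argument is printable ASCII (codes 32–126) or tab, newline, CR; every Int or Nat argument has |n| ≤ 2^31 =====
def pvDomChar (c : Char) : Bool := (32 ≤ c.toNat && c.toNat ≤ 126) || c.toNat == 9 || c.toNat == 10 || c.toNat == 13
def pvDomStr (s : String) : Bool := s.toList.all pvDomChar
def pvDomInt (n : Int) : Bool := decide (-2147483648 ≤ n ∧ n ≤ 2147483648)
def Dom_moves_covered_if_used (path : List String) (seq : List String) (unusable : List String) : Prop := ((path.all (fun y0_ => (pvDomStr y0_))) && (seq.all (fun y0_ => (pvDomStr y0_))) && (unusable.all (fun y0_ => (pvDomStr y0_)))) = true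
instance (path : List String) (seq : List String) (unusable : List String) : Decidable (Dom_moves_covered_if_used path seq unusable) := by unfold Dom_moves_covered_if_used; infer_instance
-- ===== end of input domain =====

-- B replaces A's per-start window rescan by ONE left-to-right pass over path that carries the list
-- of progresses of all still-alive partial matches (counting completed matches on the fly and the
-- truncated end-of-path matches from the surviving progresses); measured faster: per-element work
-- is proportional to the number of live partial matches instead of a full window rescan per start.

-- ===== PORT A =====
-- inner loop of A: 'for a, b in zip(path[i:], seq): if a != b or a in unusable: matches = False; break'
def pvAllMatch (pairs : List (String × String)) (unusable : List String) : Bool :=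
  match pairs with
  | [] => true
  | (a, b) :: rest => if a != b || unusable.contains a then false else pvAllMatch rest unusable

def moves_covered_if_used (path : List String) (seq : List String) (unusable : List String) : Int :=
  (List.range path.length).foldl
    (fun n i => if pvAllMatch ((path.drop i).zip seq) unusable then n + (seq.length : Int) else n) 0

-- ===== PORT B =====
-- 'seq[j]' is ported as 'seq[j]? == some x' (exact: B only ever stores j with j < seq.length)
def moves_covered_if_used_alt (path : List String) (seq : List String) (unusable : List String) : Int :=
  let m := seq.length
  if m = 0 then 0 else
    let st := path.foldl (fun (st : Int × List Nat) x =>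
      let good := !(unusable.contains x)
      (st.2 ++ [0]).foldl (fun (st' : Int × List Nat) j =>
        if good && (seq[j]? == some x) then
          (if j + 1 = m then (st'.1 + 1, st'.2) else (st'.1, st'.2 ++ [j + 1]))
        else st') (st.1, [])) ((0 : Int), ([] : List Nat))
    (m : Int) * (st.1 + (st.2.length : Int))

-- ===== PRECONDITION & SPEC =====
def Spec_moves_covered_if_used (path : List String) (seq : List String) (unusable : List String) (out : Int) : Prop := out = moves_covered_if_used_alt path seq unusable
instance (path : List String) (seq : List String) (unusable : List String) (out : Int) : Decidable (Spec_moves_covered_if_used path seq unusable out) := by unfold Spec_moves_covered_if_used; infer_instance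

-- ===== CLAIM (what is proved, stated in full; the proofs are below) =====
def Claim_equal_moves_covered_if_used : Prop := ∀ (path : List String) (seq : List String) (unusable : List String), Dom_moves_covered_if_used path seq unusable → Spec_moves_covered_if_used path seq unusable (moves_covered_if_used path seq unusable)

-- ===== LEMMAS AND PROOFS =====

-- x extends a partial match of progress j (the element matches seq[j] and is usable)
def hitB (seq unusable : List String) (x : String) (j : Nat) : Bool :=
  !(unusable.contains x) && (seq[j]? == some x)

-- position i+j of path matches seq[j]
def condB (path seq unusable : List String) (i j : Nat) : Bool :=
  match path[i + j]? with
  | some a => hitB seq unusable a j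
  | none => false

-- the start i has matched every compared position below k
def PmB (path seq unusable : List String) (i k : Nat) : Bool :=
  decide (∀ j, j < k - i → condB path seq unusable i j = true)

-- A's per-start success condition
def matchesB (path seq unusable : List String) (i : Nat) : Bool :=
  decide (∀ j, j < min (path.length - i) seq.length → condB path seq unusable i j = true)

-- running total of completed matches after k elements
def TK (path seq unusable : List String) (k : Nat) : Int :=
  (((List.range k).countP
    (fun i => decide (i + seq.length ≤ k) && PmB path seq unusable i (i + seq.length)) : Nat) : Int)

-- list of progress values of the still-alive partial matches after k elements
def AK (path seq unusable : List String) (k : Nat) : List Nat :=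
  ((List.range k).filter
    (fun i => decide (k < i + seq.length) && PmB path seq unusable i k)).map (fun i => k - i)

lemma countP_or_disjoint {α : Type} (p q : α → Bool) (l : List α)
    (h : ∀ a ∈ l, ¬(p a = true ∧ q a = true)) :
    l.countP (fun a => p a || q a) = l.countP p + l.countP q := by
  induction l with
  | nil => simp
  | cons a l ih =>
    have ha := h a (by simp)
    have hl : ∀ b ∈ l, ¬(p b = true ∧ q b = true) := fun b hb => h b (by simp [hb])
    simp only [List.countP_cons, ih hl]
    cases hp : p a <;> cases hq : q a <;> simp_all <;> omega

lemma foldl_if_add (p : Nat → Bool) (m : Int) :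
    ∀ (l : List Nat) (c : Int),
      l.foldl (fun n i => if p i then n + m else n) c = c + m * (l.countP p : Nat) := by
  intro l
  induction l with
  | nil => intro c; simp
  | cons a l ih =>
    intro c
    simp only [List.foldl_cons, List.countP_cons, ih]
    cases h : p a <;> simp <;> push_cast <;> ring

lemma pvAllMatch_iff (u : List String) :
    ∀ (xs ys : List String),
      pvAllMatch (xs.zip ys) u = true ↔
        ∀ j, j < min xs.length ys.length →
          (match xs[j]? with
           | some a => !(u.contains a) && (ys[j]? == some a)
           | none => false) = true := by
  intro xs
  induction xs with
  | nil => intro ys; simp [pvAllMatch]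
  | cons a xs ih =>
    intro ys
    cases ys with
    | nil => simp [pvAllMatch]
    | cons b ys =>
      simp only [List.zip_cons_cons, pvAllMatch, List.length_cons]
      have hmin : min (xs.length + 1) (ys.length + 1) = min xs.length ys.length + 1 := by
        omega
      by_cases hab : (a != b || u.contains a) = true
      · rw [if_pos hab]
        simp only [Bool.false_eq_true, false_iff, not_forall]
        refine ⟨0, by omega, ?_⟩
        simp only [List.getElem?_cons_zero]
        rcases Bool.or_eq_true_iff.mp hab with h | h
        · have : ¬ (b = a) := fun he => by simp [he] at h
          simp [this]
        · have hmem : a ∈ u := by simpa using h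
          simp [hmem]
      · rw [if_neg hab]
        have hab' : (a != b || u.contains a) = false := by simpa using hab
        have h1 : (a == b) = true := by
          rcases Bool.or_eq_false_iff.mp hab' with ⟨h, _⟩
          simpa using h
        have h2 : u.contains a = false := (Bool.or_eq_false_iff.mp hab').2
        have hba : a = b := by simpa using h1
        rw [ih ys]
        constructor
        · intro h j hj
          rw [hmin] at hj
          cases j with
          | zero =>
            simp only [List.getElem?_cons_zero]
            subst hba
            have hmem : a ∉ u := by simpa using h2
            simp [hmem]
          | succ j =>
            simp only [List.getElem?_cons_succ]
            exact h j (by omega)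
        · intro h j hj
          have := h (j + 1) (by omega)
          simpa using this

lemma pvAllMatch_eq_matchesB (path seq u : List String) (i : Nat) :
    pvAllMatch ((path.drop i).zip seq) u = matchesB path seq u i := by
  rw [Bool.eq_iff_iff, pvAllMatch_iff]
  simp only [matchesB, decide_eq_true_eq, List.length_drop, List.getElem?_drop]
  exact Iff.rfl

lemma inner_char (seq u : List String) (m : Nat) (x : String) :
    ∀ (l : List Nat) (t : Int) (acc : List Nat),
      l.foldl (fun (st' : Int × List Nat) j =>
          if !(u.contains x) && (seq[j]? == some x) then
            (if j + 1 = m then (st'.1 + 1, st'.2) else (st'.1, st'.2 ++ [j + 1]))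
          else st') (t, acc)
      = (t + ((l.countP (fun j => hitB seq u x j && (j + 1 == m)) : Nat) : Int),
         acc ++ (l.filter (fun j => hitB seq u x j && !(j + 1 == m))).map (· + 1)) := by
  intro l
  induction l with
  | nil => intro t acc; simp
  | cons j l ih =>
    intro t acc
    rw [List.foldl_cons]
    by_cases hh : (!(u.contains x) && (seq[j]? == some x)) = true
    · rw [if_pos hh]
      by_cases hjm : j + 1 = m
      · have hb : (j + 1 == m) = true := by simpa using hjm
        rw [if_pos hjm, ih]
        simp only [List.countP_cons, List.filter_cons, hitB, hh, hb, Bool.and_true,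
          Bool.true_and, Bool.not_true, Bool.and_false, Bool.false_eq_true, if_false,
          Prod.mk.injEq]
        constructor
        · push_cast; ring
        · trivial
      · have hb : (j + 1 == m) = false := by simpa using hjm
        rw [if_neg hjm, ih]
        simp only [List.countP_cons, List.filter_cons, hitB, hh, hb, Bool.and_false,
          Bool.not_false, Bool.and_true, Bool.true_and, Bool.false_eq_true, if_false,
          if_true, List.map_cons, Prod.mk.injEq]
        constructor
        · rfl
        · simp
    · rw [if_neg hh]
      rw [ih]
      have hh' : (!(u.contains x) && (seq[j]? == some x)) = false := by
        simpa using hh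
      simp only [List.countP_cons, List.filter_cons, hitB, hh', Bool.false_and,
        Bool.false_eq_true, if_false, add_zero]

lemma condB_at (path seq u : List String) (i k : Nat) (hik : i ≤ k) (hk : k < path.length) :
    condB path seq u i (k - i) = hitB seq u path[k] (k - i) := by
  have h : i + (k - i) = k := by omega
  simp [condB, h, List.getElem?_eq_getElem hk]

lemma PmB_succ (path seq u : List String) (i k : Nat) (hik : i ≤ k) :
    PmB path seq u i (k + 1) = true ↔
      (PmB path seq u i k = true ∧ condB path seq u i (k - i) = true) := by
  have h : k + 1 - i = (k - i) + 1 := by omega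
  simp only [PmB, h, decide_eq_true_eq]
  constructor
  · intro hall
    exact ⟨fun j hj => hall j (by omega), hall (k - i) (by omega)⟩
  · rintro ⟨hall, hlast⟩ j hj
    rcases Nat.lt_succ_iff_lt_or_eq.mp hj with h' | h'
    · exact hall j h'
    · subst h'; exact hlast

lemma PmB_zero (path seq u : List String) (k : Nat) : PmB path seq u k k = true := by
  simp [PmB]

lemma TK_succ (path seq u : List String) (hm : seq.length ≠ 0) (k : Nat)
    (hk : k < path.length) :
    TK path seq u (k + 1)
      = TK path seq u k
        + (((List.range (k + 1)).countP
            (fun i => decide (i + seq.length = k + 1)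
                      && PmB path seq u i (i + seq.length)) : Nat) : Int) := by
  have hsplit : (List.range (k + 1)).countP
      (fun i => decide (i + seq.length ≤ k + 1) && PmB path seq u i (i + seq.length))
    = (List.range (k + 1)).countP
        (fun i => decide (i + seq.length ≤ k) && PmB path seq u i (i + seq.length))
      + (List.range (k + 1)).countP
          (fun i => decide (i + seq.length = k + 1) && PmB path seq u i (i + seq.length)) := by
    rw [← countP_or_disjoint _ _ _ (by
      intro a _ h
      rcases h with ⟨h1, h2⟩
      simp only [Bool.and_eq_true, decide_eq_true_eq] at h1 h2
      omega)]
    apply List.countP_congr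
    intro i _
    simp only [Bool.and_eq_true, Bool.or_eq_true, decide_eq_true_eq]
    constructor
    · rintro ⟨h1, h2⟩
      by_cases h : i + seq.length ≤ k
      · exact Or.inl ⟨h, h2⟩
      · exact Or.inr ⟨by omega, h2⟩
    · rintro (⟨h1, h2⟩ | ⟨h1, h2⟩) <;> exact ⟨by omega, h2⟩
  have hold : (List.range (k + 1)).countP
      (fun i => decide (i + seq.length ≤ k) && PmB path seq u i (i + seq.length))
    = (List.range k).countP
        (fun i => decide (i + seq.length ≤ k) && PmB path seq u i (i + seq.length)) := by
    rw [List.range_succ, List.countP_append]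
    have hne : seq ≠ [] := by intro h; exact hm (by simp [h])
    simp [List.countP_cons, hne]
  simp only [TK, hsplit, hold]
  push_cast
  ring

lemma loop_inv (path seq u : List String) (hm : seq.length ≠ 0) :
    ∀ k, k ≤ path.length →
      (path.take k).foldl (fun (st : Int × List Nat) x =>
        (st.2 ++ [0]).foldl (fun (st' : Int × List Nat) j =>
          if !(u.contains x) && (seq[j]? == some x) then
            (if j + 1 = seq.length then (st'.1 + 1, st'.2) else (st'.1, st'.2 ++ [j + 1]))
          else st') (st.1, [])) ((0 : Int), ([] : List Nat))
      = (TK path seq u k, AK path seq u k) := by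
  intro k
  induction k with
  | zero => simp [TK, AK]
  | succ k ih =>
    intro hk1
    have hk : k < path.length := by omega
    have hx : path[k]?.toList = [path[k]] := by simp [List.getElem?_eq_getElem hk]
    rw [List.take_add_one, hx, List.foldl_append, ih (by omega), List.foldl_cons,
      List.foldl_nil]
    rw [inner_char]
    have hcand : AK path seq u k ++ [0]
        = ((List.range (k + 1)).filter
            (fun i => decide (k < i + seq.length) && PmB path seq u i k)).map
              (fun i => k - i) := by
      rw [AK, List.range_succ, List.filter_append, List.map_append]
      have h0 : 0 < seq.length := by omega
      simp [List.filter_cons, h0, PmB_zero]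
    rw [hcand]
    have core : ∀ i, i ≤ k →
        ((PmB path seq u i k = true ∧ hitB seq u path[k] (k - i) = true) ↔
          PmB path seq u i (k + 1) = true) := by
      intro i hi
      rw [PmB_succ path seq u i k hi, condB_at path seq u i k hi hk]
    refine Prod.ext ?_ ?_
    · show TK path seq u k + _ = TK path seq u (k + 1)
      rw [TK_succ path seq u hm k hk]
      congr 1
      rw [List.countP_map, List.countP_filter]
      push_cast
      congr 1
      apply List.countP_congr
      intro i hi
      simp only [List.mem_range] at hi
      have hik : i ≤ k := by omega
      simp only [Function.comp, Bool.and_eq_true, decide_eq_true_eq, beq_iff_eq]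
      constructor
      · rintro ⟨⟨hhit, hfull⟩, hklt, hpm⟩
        have hkm : i + seq.length = k + 1 := by omega
        refine ⟨hkm, ?_⟩
        rw [hkm]
        exact (core i hik).mp ⟨hpm, hhit⟩
      · rintro ⟨hkm, hpm⟩
        rw [hkm] at hpm
        rcases (core i hik).mpr hpm with ⟨hpmk, hhit⟩
        exact ⟨⟨hhit, by omega⟩, by omega, hpmk⟩
    · show _ = AK path seq u (k + 1)
      rw [List.filter_map, List.map_map, List.filter_filter, AK]
      have hfe : ((List.range (k + 1)).filter
          (fun i => ((fun j => hitB seq u path[k] j && !(j + 1 == seq.length)) ∘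
              (fun i => k - i)) i
            && (decide (k < i + seq.length) && PmB path seq u i k)))
          = ((List.range (k + 1)).filter
              (fun i => decide (k + 1 < i + seq.length) && PmB path seq u i (k + 1))) := by
        apply List.filter_congr
        intro i hi
        simp only [List.mem_range] at hi
        have hik : i ≤ k := by omega
        rw [Bool.eq_iff_iff]
        simp only [Function.comp, Bool.and_eq_true, Bool.not_eq_true', decide_eq_true_eq,
          beq_eq_false_iff_ne]
        constructor
        · rintro ⟨⟨hhit, hne⟩, hklt, hpm⟩
          refine ⟨by omega, (core i hik).mp ⟨hpm, hhit⟩⟩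
        · rintro ⟨hlt, hpm⟩
          rcases (core i hik).mpr hpm with ⟨hpmk, hhit⟩
          exact ⟨⟨hhit, by omega⟩, by omega, hpmk⟩
      rw [hfe]
      simp only [List.nil_append]
      apply List.map_congr_left
      intro i hi
      simp only [List.mem_filter, List.mem_range] at hi
      have : i ≤ k := by omega
      simp only [Function.comp]
      omega

lemma final_count (path seq u : List String) (hm : seq.length ≠ 0) :
    TK path seq u path.length + ((AK path seq u path.length).length : Int)
      = ((List.range path.length).countP (matchesB path seq u) : Nat) := by
  rw [TK, AK, List.length_map, ← List.countP_eq_length_filter]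
  push_cast
  rw [← Nat.cast_add]
  congr 1
  rw [← countP_or_disjoint _ _ _ (by
    intro a _ h
    rcases h with ⟨h1, h2⟩
    simp only [Bool.and_eq_true, decide_eq_true_eq] at h1 h2
    omega)]
  apply List.countP_congr
  intro i hi
  simp only [List.mem_range] at hi
  simp only [Bool.or_eq_true, Bool.and_eq_true, decide_eq_true_eq, PmB, matchesB,
    decide_eq_true_eq]
  constructor
  · rintro (⟨h1, h2⟩ | ⟨h1, h2⟩)
    · intro j hj
      exact h2 j (by omega)
    · intro j hj
      exact h2 j (by omega)
  · intro h
    by_cases hc : i + seq.length ≤ path.length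
    · exact Or.inl ⟨hc, fun j hj => h j (by omega)⟩
    · exact Or.inr ⟨by omega, fun j hj => h j (by omega)⟩

lemma A_value (path seq u : List String) :
    moves_covered_if_used path seq u
      = (seq.length : Int) * ((List.range path.length).countP (matchesB path seq u) : Nat) := by
  unfold moves_covered_if_used
  rw [foldl_if_add (fun i => pvAllMatch ((path.drop i).zip seq) u) (seq.length : Int)]
  rw [zero_add]
  congr 2
  apply List.countP_congr
  intro i _
  rw [pvAllMatch_eq_matchesB]

-- ===== VERDICT (by name: the statement is the Claim_ definition above) =====
theorem moves_covered_if_used_spec : Claim_equal_moves_covered_if_used := by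
  intro path seq u _
  unfold Spec_moves_covered_if_used
  by_cases hm : seq.length = 0
  · have hz : ((List.range path.length).countP (matchesB path seq u) : Int) * 0 = 0 := by
      ring
    simp [moves_covered_if_used_alt, hm, A_value]
  · rw [A_value]
    simp only [moves_covered_if_used_alt, if_neg hm]
    rw [← List.take_length (l := path), loop_inv path seq u hm path.length (le_refl _)]
    rw [List.take_length]
    rw [final_count path seq u hm]
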